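-- pv_equiv track=rewrite | github.com/pypi-data/pypi-mirror-384 | packages/codetective/codetective-0.1.0.tar.gz/codetective-0.1.0/codetective/agents/output/comment_agent.py | _get_line_indentation
-- ===== SOURCE A (Python) =====
-- def _get_line_indentation(line: str) -> str:
--     """Get the indentation (spaces/tabs) from a line."""
--     indent = ""
--     for char in line:
--         if char in [" ", "\t"]:
--             indent += char
--         else:
--             break
--     return indent
-- ===== SOURCE B (Python) =====
-- def _get_line_indentation(line: str) -> str:
--     """Get the indentation (spaces/tabs) from a line."""
--     return line[:len(line) - len(line.lstrip(" \t"))]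
-- ===== Notes on version B (the rewrite author's own statement) =====
-- stated objective: idiomatic
-- what changed: Replaces the explicit character-accumulation loop with a closed-form slice: the indentation length is measured by left-stripping spaces and tabs and that prefix is sliced off in one expression, no loop or branch.
import Mathlib
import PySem

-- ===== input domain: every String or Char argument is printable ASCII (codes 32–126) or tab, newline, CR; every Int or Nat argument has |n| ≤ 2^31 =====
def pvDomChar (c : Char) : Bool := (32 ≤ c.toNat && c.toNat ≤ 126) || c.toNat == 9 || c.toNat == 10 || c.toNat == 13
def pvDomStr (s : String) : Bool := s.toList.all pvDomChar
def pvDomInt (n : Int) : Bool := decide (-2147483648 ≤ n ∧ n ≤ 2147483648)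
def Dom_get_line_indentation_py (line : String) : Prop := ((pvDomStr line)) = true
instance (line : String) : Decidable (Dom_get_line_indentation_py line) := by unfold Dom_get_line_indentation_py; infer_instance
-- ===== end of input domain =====

-- B replaces A's explicit accumulation loop with a closed-form slice (length of lstrip(" \t") measured, prefix sliced off); idiomatic, same cost.


-- ===== PORT A =====
-- the 'for char in line: … break' loop, with the running 'indent' accumulator
def get_line_indentation_go : List Char → String → String
  | [], indent => indent
  | c :: rest, indent =>
      if c = ' ' ∨ c = '\t' then get_line_indentation_go rest (indent ++ c.toString)
      else indent

def get_line_indentation_py (line : String) : String :=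
  get_line_indentation_go line.toList ""

-- ===== PORT B =====
-- line.lstrip(" \t"): drop leading chars among {' ', '\t'} (hand port, exact: lstrip with an
-- explicit char set removes exactly the maximal leading run of those chars)
def pyLstripSpTab (cs : List Char) : List Char :=
  cs.dropWhile (fun c => c = ' ' || c = '\t')

def get_line_indentation_py_alt (line : String) : String :=
  String.ofList (PySem.List.slice line.toList none
    (some ((line.toList.length : Int) - ((pyLstripSpTab line.toList).length : Int))))

-- ===== PRECONDITION & SPEC =====
def Spec_get_line_indentation_py (line : String) (out : String) : Prop := out = get_line_indentation_py_alt line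
instance (line : String) (out : String) : Decidable (Spec_get_line_indentation_py line out) := by unfold Spec_get_line_indentation_py; infer_instance

-- ===== CLAIM (what is proved, stated in full; the proofs are below) =====
def Claim_equal_get_line_indentation_py : Prop := ∀ (line : String), Dom_get_line_indentation_py line → Spec_get_line_indentation_py line (get_line_indentation_py line)

-- ===== LEMMAS AND PROOFS =====

lemma go_eq_takeWhile (cs : List Char) :
    ∀ acc : String, get_line_indentation_go cs acc
      = acc ++ String.ofList (cs.takeWhile (fun c => c = ' ' || c = '\t')) := by
  induction cs with
  | nil =>
      intro acc
      simp only [get_line_indentation_go, List.takeWhile_nil]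
      apply String.ext; simp
  | cons c rest ih =>
      intro acc
      by_cases h : c = ' ' ∨ c = '\t'
      · have hb : (fun c => c = ' ' || c = '\t') c = true := by
          rcases h with h | h <;> simp [h]
        simp only [get_line_indentation_go, if_pos h, ih, List.takeWhile_cons, hb]
        apply String.ext; simp
      · have hb : (fun c => c = ' ' || c = '\t') c = false := by
          simp only [not_or] at h; simp [h.1, h.2]
        simp only [get_line_indentation_go, if_neg h, List.takeWhile_cons, hb]
        apply String.ext; simp

lemma take_sub_dropWhile (p : Char → Bool) (cs : List Char) :
    cs.take (cs.length - (cs.dropWhile p).length) = cs.takeWhile p := by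
  induction cs with
  | nil => simp
  | cons c rest ih =>
      by_cases h : p c
      · have hle : (rest.dropWhile p).length ≤ rest.length := rest.length_dropWhile_le p
        have harith : (c :: rest).length - ((c :: rest).dropWhile p).length
            = (rest.length - (rest.dropWhile p).length) + 1 := by
          simp [List.dropWhile_cons, h]; omega
        rw [harith, List.take_succ_cons, ih]
        simp [h]
      · simp [List.takeWhile_cons, h]

-- ===== VERDICT (by name: the statement is the Claim_ definition above) =====
theorem get_line_indentation_py_spec : Claim_equal_get_line_indentation_py := by
  intro line _
  unfold Spec_get_line_indentation_py get_line_indentation_py get_line_indentation_py_alt pyLstripSpTab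
  rw [go_eq_takeWhile]
  have hle : ((line.toList.dropWhile (fun c => c = ' ' || c = '\t')).length)
      ≤ line.toList.length := line.toList.length_dropWhile_le _
  have hcast : ((line.toList.length : Int) - ((line.toList.dropWhile (fun c => c = ' ' || c = '\t')).length : Int))
      = ((line.toList.length - (line.toList.dropWhile (fun c => c = ' ' || c = '\t')).length : Nat) : Int) := by
    omega
  rw [hcast, PySem.List.slice_to_natCast, take_sub_dropWhile]
  simp
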